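-- pv_equiv track=rewrite | github.com/saist1993/IntersectionalBias | src/mmd_gen_mechanism.py | generate_abstract_node
-- ===== SOURCE A (Python) =====
-- import copy
-- from itertools import combinations
--
-- def generate_abstract_node(s, k=2):
--     all_s_combinations = []
--
--     for i in combinations(range(len(s)), k):
--         _temp = list(copy.deepcopy(s))
--         for j in i:
--             _temp[j] = 'x'
--         all_s_combinations.append(tuple(_temp))
--
--     return all_s_combinations
-- ===== SOURCE B (Python) =====
-- def generate_abstract_node(s, k=2):
--     n = len(s)
--     if k < 0:
--         return []
--
--     def rec(i, rem):
--         # suffix tuples from position i with rem positions masked, masked-first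
--         if rem == 0:
--             return [tuple(s[i:])]
--         if rem > n - i:
--             return []
--         masked = [('x',) + t for t in rec(i + 1, rem - 1)]
--         kept = [(s[i],) + t for t in rec(i + 1, rem)]
--         return masked + kept
--
--     return rec(0, k)
-- ===== Notes on version B (the rewrite author's own statement) =====
-- stated objective: alternative
-- what changed: Replaces the itertools.combinations-over-index-tuples loop (which deep-copies s and overwrites masked positions per combination) with a direct recursive suffix enumerator that at each position either masks it with 'x' or keeps it, building each output tuple front-to-back in the same lexicographic order.
import Mathlib
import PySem

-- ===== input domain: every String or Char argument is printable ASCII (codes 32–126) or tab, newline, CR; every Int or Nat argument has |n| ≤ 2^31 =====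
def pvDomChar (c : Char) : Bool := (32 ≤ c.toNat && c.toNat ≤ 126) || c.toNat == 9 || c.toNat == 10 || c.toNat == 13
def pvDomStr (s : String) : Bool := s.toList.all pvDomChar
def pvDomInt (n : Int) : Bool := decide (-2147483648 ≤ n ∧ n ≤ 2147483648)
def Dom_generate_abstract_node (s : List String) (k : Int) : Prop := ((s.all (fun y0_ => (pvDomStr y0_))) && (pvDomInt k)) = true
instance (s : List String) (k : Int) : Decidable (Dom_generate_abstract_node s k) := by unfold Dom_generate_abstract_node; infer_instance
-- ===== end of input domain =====

-- B replaces itertools.combinations over index tuples (plus per-combination copy-and-set)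
-- by a direct recursive suffix enumerator that builds each masked tuple front-to-back; objective: alternative.

-- ===== PORT A =====
-- hand port of itertools.combinations(l, k) in lexicographic order (exact for k ≥ 0)
def pvCombs (k : Nat) (l : List Nat) : List (List Nat) :=
  match k, l with
  | 0, _ => [[]]
  | _ + 1, [] => []
  | k + 1, x :: xs => (pvCombs k xs).map (fun c => x :: c) ++ pvCombs (k + 1) xs

def generate_abstract_node (s : List String) (k : Int) : List (List String) :=
  -- for each index combination i: _temp = list(s); for j in i: _temp[j] = 'x'; collect tuple(_temp)
  (pvCombs k.toNat (List.range s.length)).map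
    (fun i => i.foldl (fun t j => t.set j "x") s)

-- ===== PORT B =====
-- rec(i, rem) over the suffix s[i:] (here: structural recursion on the suffix list)
def pvAbRec (xs : List String) (rem : Int) : List (List String) :=
  if rem = 0 then [xs]
  else if (xs.length : Int) < rem then []
  else
    match xs with
    | [] => []
    | x :: rest =>
      ((pvAbRec rest (rem - 1)).map (fun t => "x" :: t)) ++
      ((pvAbRec rest rem).map (fun t => x :: t))

def generate_abstract_node_alt (s : List String) (k : Int) : List (List String) :=
  if k < 0 then [] else pvAbRec s k

-- ===== PRECONDITION & SPEC =====
-- Pre_ excludes exactly k < 0, where A raises ValueError ('r must be non-negative' from itertools.combinations); B returns the empty list there.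
def Pre_generate_abstract_node (s : List String) (k : Int) : Prop := 0 ≤ k
instance (s : List String) (k : Int) : Decidable (Pre_generate_abstract_node s k) := by unfold Pre_generate_abstract_node; infer_instance
def pvWitness_generate_abstract_node : List String × Int := (["a", "b", "c"], 2)

def Spec_generate_abstract_node (s : List String) (k : Int) (out : List (List String)) : Prop := out = generate_abstract_node_alt s k
instance (s : List String) (k : Int) (out : List (List String)) : Decidable (Spec_generate_abstract_node s k out) := by unfold Spec_generate_abstract_node; infer_instance

-- ===== CLAIM (what is proved, stated in full; the proofs are below) =====
def Claim_equal_generate_abstract_node : Prop := ∀ (s : List String) (k : Int), Dom_generate_abstract_node s k → Pre_generate_abstract_node s k → Spec_generate_abstract_node s k (generate_abstract_node s k)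

-- ===== LEMMAS AND PROOFS =====

-- combinations of a too-short list are empty
theorem pvCombs_of_short (k : Nat) (l : List Nat) (h : l.length < k) : pvCombs k l = [] := by
  induction l generalizing k with
  | nil => cases k with
    | zero => omega
    | succ k => rfl
  | cons x xs ih =>
    cases k with
    | zero => omega
    | succ k =>
      simp only [pvCombs]
      rw [ih k (by simpa using Nat.lt_of_succ_lt_succ h), ih (k+1) (by simp at h ⊢; omega)]
      simp

-- combinations commute with mapping over the elements
theorem pvCombs_map (k : Nat) (g : Nat → Nat) (l : List Nat) :
    pvCombs k (l.map g) = (pvCombs k l).map (List.map g) := by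
  induction l generalizing k with
  | nil => cases k <;> rfl
  | cons x xs ih =>
    cases k with
    | zero => rfl
    | succ k =>
      simp only [List.map_cons, pvCombs, ih, List.map_append, List.map_map]
      rfl

-- setting only shifted (≥ 1) indices leaves the head untouched
theorem foldl_set_shift (a : String) (rest : List String) (l : List Nat) :
    List.foldl (fun t j => t.set j "x") (a :: rest) (l.map (· + 1)) =
      a :: List.foldl (fun t j => t.set j "x") rest l := by
  induction l generalizing rest with
  | nil => rfl
  | cons h t ih =>
    simp only [List.map_cons, List.foldl_cons, List.set]
    exact ih (rest.set h "x")

-- main bridge: A's combination-of-indices form equals B's suffix recursion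
theorem bridge (s : List String) (km : Nat) :
    (pvCombs km (List.range s.length)).map (fun i => i.foldl (fun t j => t.set j "x") s)
      = pvAbRec s (km : Int) := by
  induction s generalizing km with
  | nil =>
    cases km with
    | zero => rfl
    | succ km =>
      rw [pvAbRec]
      rw [if_neg (by push_cast; omega), if_pos (by simp)]
      simp [pvCombs]
  | cons x rest ih =>
    cases km with
    | zero => rw [pvAbRec]; simp [pvCombs]
    | succ km =>
      by_cases hlen : rest.length + 1 < km + 1
      · rw [pvAbRec]
        rw [pvCombs_of_short _ _ (by simpa using hlen)]
        simp only [List.map_nil]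
        have h0 : ¬ ((km + 1 : Nat) : Int) = 0 := by exact_mod_cast Nat.succ_ne_zero km
        rw [if_neg h0, if_pos (by simp only [List.length_cons]; push_cast; omega)]
      · rw [pvAbRec]
        have h0 : ¬ ((km + 1 : Nat) : Int) = 0 := by exact_mod_cast Nat.succ_ne_zero km
        rw [if_neg h0, if_neg (by simp only [List.length_cons]; push_cast; omega)]
        have hrange : List.range (x :: rest).length = 0 :: (List.range rest.length).map (· + 1) := by
          simp [List.range_succ_eq_map]
        rw [hrange]
        simp only [pvCombs, pvCombs_map, List.map_append, List.map_map]
        congr 1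
        · have : ((km + 1 : Nat) : Int) - 1 = (km : Int) := by push_cast; ring
          rw [this, ← ih km, List.map_map]
          apply List.map_congr_left
          intro c _
          simp only [Function.comp]
          show List.foldl (fun t j => t.set j "x") ((x :: rest).set 0 "x") (c.map (· + 1)) = _
          simpa using foldl_set_shift "x" rest c
        · rw [← ih (km + 1), List.map_map]
          apply List.map_congr_left
          intro c _
          simp only [Function.comp]
          exact foldl_set_shift x rest c

-- ===== VERDICT (by name: the statement is the Claim_ definition above) =====
theorem generate_abstract_node_spec : Claim_equal_generate_abstract_node := by
  intro s k _ hk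
  unfold Spec_generate_abstract_node generate_abstract_node generate_abstract_node_alt
  rw [if_neg (not_lt.mpr hk)]
  have hkk : ((k.toNat : Nat) : Int) = k := Int.toNat_of_nonneg hk
  rw [← hkk]
  exact bridge s k.toNat
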